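-- pv_equiv track=rewrite | github.com/ange1inaxu/snek-is-you | main.py | strip_AND
-- ===== SOURCE A (Python) =====
-- def strip_AND(phrase, word_type):
--     '''
--     Helper function for parse_rules. Returns a list of filtered words in
--     phrase (a list of words), given that they are of word_type (NOUNS or PROPERTIES)
--     Also checks the validity of the syntax. Returns an empty list if not valid.
--     '''
--     stripped = []
--
--     # iterate through each word in phrase (list)
--     for i in range(len(phrase)):
--
--         # first word must be of word_type
--         if i%2 == 0:
--             if phrase[i] in word_type:    # word_type refers to NOUNS or PROPERTIES
--                 stripped.append(phrase[i])
--
--         # following word must be 'AND' conjunction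
--         if i%2 == 1:
--             # return empty list if syntax is not met
--             if phrase[i] != 'AND':
--                 return []
--
--     return stripped
-- ===== SOURCE B (Python) =====
-- def strip_AND(phrase, word_type):
--     '''Staged decomposition: split the phrase into its two subsequences first --
--     the conjunction positions phrase[1::2] and the word positions phrase[0::2] --
--     validate the whole conjunction slice up front, then filter the word slice.
--     No interleaved collect-while-checking loop.'''
--     if not all(c == 'AND' for c in phrase[1::2]):
--         return []
--     return [w for w in phrase[0::2] if w in word_type]
-- ===== Notes on version B (the rewrite author's own statement) =====
-- stated objective: alternative
-- what changed: Replaced A's single interleaved index-parity loop (collecting matches while checking conjunctions, with an early return) by two staged passes over separated subsequences: validate the whole odd slice phrase[1::2] with all(), then filter the even slice phrase[0::2] with a comprehension.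
import Mathlib
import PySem

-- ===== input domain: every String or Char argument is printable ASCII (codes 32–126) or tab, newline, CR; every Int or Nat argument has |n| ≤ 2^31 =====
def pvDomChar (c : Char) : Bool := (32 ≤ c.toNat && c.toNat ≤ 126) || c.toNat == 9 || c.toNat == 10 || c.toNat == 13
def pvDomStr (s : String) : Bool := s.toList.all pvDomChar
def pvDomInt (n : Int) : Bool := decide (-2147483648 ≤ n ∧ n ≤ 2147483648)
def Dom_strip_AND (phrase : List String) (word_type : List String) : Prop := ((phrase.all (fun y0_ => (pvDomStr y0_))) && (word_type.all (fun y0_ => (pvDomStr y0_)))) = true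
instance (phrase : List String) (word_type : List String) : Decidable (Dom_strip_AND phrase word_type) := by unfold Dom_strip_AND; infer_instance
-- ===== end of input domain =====

-- B replaces A's interleaved index-parity loop with early return by two staged
-- passes over separated subsequences: validate phrase[1::2], then filter
-- phrase[0::2]; objective: alternative (same asymptotic cost).

-- ===== PORT A =====
-- the 'for i in range(len(phrase))' loop with early return, as an index recursion
def stripLoop (phrase : List String) (word_type : List String) : Nat → List String → List String
  | i, stripped =>
    if h : i < phrase.length then
      if i % 2 == 0 then
        stripLoop phrase word_type (i + 1)
          (if word_type.contains phrase[i] then stripped ++ [phrase[i]] else stripped)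
      else
        if phrase[i] != "AND" then [] else stripLoop phrase word_type (i + 1) stripped
    else stripped
termination_by i => phrase.length - i

def strip_AND (phrase : List String) (word_type : List String) : List String :=
  stripLoop phrase word_type 0 []

-- ===== PORT B =====
-- xs[0::2]: every second element starting at index 0 (exact hand port of the step-2 slice)
def evenSlice : List String → List String
  | [] => []
  | [x] => [x]
  | x :: _ :: r => x :: evenSlice r

-- xs[1::2]: every second element starting at index 1 (exact hand port of the step-2 slice)
def oddSlice : List String → List String
  | [] => []
  | [_] => []
  | _ :: y :: r => y :: oddSlice r

def strip_AND_alt (phrase : List String) (word_type : List String) : List String :=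
  if !((oddSlice phrase).all (fun c => c == "AND")) then []
  else (evenSlice phrase).filter (fun w => word_type.contains w)

-- ===== PRECONDITION & SPEC =====
def Spec_strip_AND (phrase : List String) (word_type : List String) (out : List String) : Prop := out = strip_AND_alt phrase word_type
instance (phrase : List String) (word_type : List String) (out : List String) : Decidable (Spec_strip_AND phrase word_type out) := by unfold Spec_strip_AND; infer_instance

-- ===== CLAIM =====
def Claim_equal_strip_AND : Prop := ∀ (phrase : List String) (word_type : List String), Dom_strip_AND phrase word_type → Spec_strip_AND phrase word_type (strip_AND phrase word_type)

-- ===== LEMMAS AND PROOFS =====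

-- proof helper: A's loop from an even index, phrased as a pairwise recursion on the suffix
def pairLoop (word_type : List String) : List String → List String → List String
  | stripped, [] => stripped
  | stripped, word :: rest =>
    let stripped' := if word_type.contains word then stripped ++ [word] else stripped
    match rest with
    | [] => stripped'
    | conj :: rest' =>
      if conj ≠ "AND" then [] else pairLoop word_type stripped' rest'

-- A's loop from an even index i is pairLoop on the suffix phrase.drop i.
theorem stripLoop_eq_pairLoop (phrase word_type : List String) :
    ∀ n i acc, phrase.length - i ≤ n → i % 2 = 0 →
      stripLoop phrase word_type i acc = pairLoop word_type acc (phrase.drop i) := by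
  intro n
  induction n with
  | zero =>
    intro i acc hle _
    have hge : phrase.length ≤ i := by omega
    rw [stripLoop]
    simp [Nat.not_lt.mpr hge, List.drop_eq_nil_of_le hge, pairLoop]
  | succ n ih =>
    intro i acc hle heven
    by_cases h : i < phrase.length
    · have hdropi : phrase.drop i = phrase[i] :: phrase.drop (i + 1) :=
        List.drop_eq_getElem_cons h
      rw [stripLoop]
      simp only [h, dif_pos, heven]
      rw [if_pos (by simp : ((0:Nat) == 0) = true)]
      set acc' := if word_type.contains phrase[i] then acc ++ [phrase[i]] else acc with hacc'
      by_cases h1 : i + 1 < phrase.length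
      · have hdropi1 : phrase.drop (i + 1) = phrase[i+1] :: phrase.drop (i + 2) :=
          List.drop_eq_getElem_cons h1
        rw [stripLoop]
        simp only [h1, dif_pos]
        have hodd : ((i + 1) % 2 == 0) = false := by
          simp [Nat.add_mod, heven]
        rw [if_neg (by simp [hodd])]
        rw [hdropi, hdropi1]
        by_cases hAND : phrase[i+1] = "AND"
        · rw [if_neg (by simp [hAND])]
          have ih2 := ih (i + 2) acc' (by omega) (by omega)
          rw [ih2]
          simp [pairLoop, hAND, hacc']
        · rw [if_pos (by simp [hAND])]
          simp [pairLoop, hAND]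
      · have hnil : phrase.drop (i + 1) = [] := List.drop_eq_nil_of_le (by omega)
        rw [stripLoop]
        simp only [h1, dif_neg, not_false_iff]
        rw [hdropi, hnil]
        simp [pairLoop, hacc']
    · have hge : phrase.length ≤ i := by omega
      rw [stripLoop]
      simp [Nat.not_lt.mpr hge, List.drop_eq_nil_of_le hge, pairLoop]

-- pairLoop is exactly B: validate the odd slice, then append the filtered even slice.
theorem pairLoop_char (word_type : List String) :
    ∀ l acc, pairLoop word_type acc l =
      if (oddSlice l).all (fun c => c == "AND")
      then acc ++ (evenSlice l).filter (fun w => word_type.contains w)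
      else [] := by
  intro l
  induction l using evenSlice.induct with
  | case1 => intro acc; simp [pairLoop, oddSlice, evenSlice]
  | case2 x =>
    intro acc
    simp only [pairLoop, oddSlice, evenSlice, List.all_nil, if_true, List.filter]
    by_cases hx : x ∈ word_type <;>
      simp [hx, List.contains_eq_mem]
  | case3 x y r ih =>
    intro acc
    simp only [pairLoop, oddSlice, evenSlice, List.all_cons]
    by_cases hAND : y = "AND"
    · rw [if_neg (by simp [hAND]), ih]
      simp only [hAND, beq_self_eq_true, Bool.true_and]
      by_cases hall : (oddSlice r).all (fun c => c == "AND")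
      · simp only [hall, if_true]
        by_cases hx : x ∈ word_type <;>
          simp [hx, List.contains_eq_mem, List.append_assoc]
      · simp [hall]
    · rw [if_pos (by simp [hAND])]
      simp [hAND]

-- ===== VERDICT =====
theorem strip_AND_spec : Claim_equal_strip_AND := by
  intro phrase word_type _
  unfold Spec_strip_AND strip_AND strip_AND_alt
  rw [stripLoop_eq_pairLoop phrase word_type phrase.length 0 [] (by omega) (by omega)]
  rw [List.drop_zero, pairLoop_char]
  by_cases hall : (oddSlice phrase).all (fun c => c == "AND") <;> simp [hall]
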